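-- pv_equiv track=rewrite | github.com/JeongSae/Algorithm | programmers/Level1/과일장수.py | solution
-- ===== SOURCE A (Python) =====
-- def solution(k, m, score):
--     answer = 0
--     num_boxes = len(score) // m
--     sorted_score = sorted(score, reverse=True)
--     for i in range(num_boxes):
--         get_score = sorted_score[i*m:(i+1)*m]
--         answer += min(get_score) * m
--
--     return answer
-- ===== SOURCE B (Python) =====
-- def solution(k, m, score):
--     q = len(score) // m
--     if q <= 0:
--         return 0
--     counts = {}
--     for v in score:
--         counts[v] = counts.get(v, 0) + 1
--     total = 0
--     p = 0
--     for v in sorted(counts, reverse=True):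
--         new_p = p + counts[v]
--         total += v * (new_p // m - p // m) * m
--         p = new_p
--     return total
-- ===== Notes on version B (the rewrite author's own statement) =====
-- stated objective: alternative
-- what changed: Replaces A's full descending sort plus per-box slice-and-min scans by a counting approach: build a histogram of grades in one pass, sort only the distinct grades, and add each grade's contribution via a floor-division formula counting how many box boundaries its run of positions covers; trades A's O(n log n) sort for O(n + d log d) bookkeeping (d = distinct grades), which is not measurably faster in CPython on random inputs.
import Mathlib
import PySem

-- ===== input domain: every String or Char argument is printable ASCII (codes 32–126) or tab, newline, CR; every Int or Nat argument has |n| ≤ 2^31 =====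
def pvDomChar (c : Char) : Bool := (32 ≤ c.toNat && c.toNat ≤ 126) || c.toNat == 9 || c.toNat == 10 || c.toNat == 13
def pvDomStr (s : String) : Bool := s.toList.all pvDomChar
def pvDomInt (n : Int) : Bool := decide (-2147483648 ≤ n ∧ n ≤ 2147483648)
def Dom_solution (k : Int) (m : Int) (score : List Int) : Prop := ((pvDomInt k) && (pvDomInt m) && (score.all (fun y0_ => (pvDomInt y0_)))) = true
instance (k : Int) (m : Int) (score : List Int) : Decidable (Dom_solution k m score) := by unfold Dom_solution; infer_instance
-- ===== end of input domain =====

-- B replaces A's full descending sort + per-box slice-and-min by a histogram: count each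
-- grade once, sort only the distinct grades, and add each grade's contribution with a
-- floor-division formula (how many box boundaries its run of positions covers).

-- ===== PORT A =====
def solution (k : Int) (m : Int) (score : List Int) : Int :=
  let num_boxes := PySem.Int.floordiv (score.length : Int) m
  let sorted_score := PySem.List.sorted score (fun x => x) true
  (PySem.List.pyRange 0 num_boxes 1).foldl (fun answer i =>
    let get_score := PySem.List.slice sorted_score (some (i * m)) (some ((i + 1) * m))
    answer + (PySem.List.min? get_score (fun x => x)).getD 0 * m) 0

-- ===== PORT B =====
def solution_alt (k : Int) (m : Int) (score : List Int) : Int :=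
  let q := PySem.Int.floordiv (score.length : Int) m
  if q ≤ 0 then 0
  else
    let counts := score.foldl (fun d v => d.insert v (d.getD v 0 + 1)) PySem.Dict.empty
    ((PySem.List.sorted counts.keys (fun x => x) true).foldl
      (fun (st : Int × Int) v =>
        let new_p := st.2 + counts.getD v 0
        (st.1 + v * (PySem.Int.floordiv new_p m - PySem.Int.floordiv st.2 m) * m, new_p))
      (0, 0)).1

-- ===== PRECONDITION & SPEC =====
-- m = 0 makes `len(score) // m` raise ZeroDivisionError in A (and in B); that is the only excluded input.
def Pre_solution (k : Int) (m : Int) (score : List Int) : Prop := m ≠ 0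
instance (k : Int) (m : Int) (score : List Int) : Decidable (Pre_solution k m score) := by unfold Pre_solution; infer_instance
def pvWitness_solution : Int × Int × List Int := (4, 3, [1, 2, 3, 1, 2, 3, 1])
def Spec_solution (k : Int) (m : Int) (score : List Int) (out : Int) : Prop := out = solution_alt k m score
instance (k : Int) (m : Int) (score : List Int) (out : Int) : Decidable (Spec_solution k m score out) := by unfold Spec_solution; infer_instance

-- ===== CLAIM (what is proved, stated in full; the proofs are below) =====
def Claim_equal_solution : Prop := ∀ (k : Int) (m : Int) (score : List Int), Dom_solution k m score → Pre_solution k m score → Spec_solution k m score (solution k m score)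

-- ===== LEMMAS AND PROOFS =====

-- the value selected at every M-th global position: selPos M xs p sums the elements of xs
-- whose global 1-based position (p + local index + 1) is a multiple of M
def selPos (M : Nat) : List Int → Nat → Int
  | [], _ => 0
  | x :: xs, p => (if (p + 1) % M = 0 then x else 0) + selPos M xs (p + 1)

lemma selPos_shift (M : Nat) : ∀ (xs : List Int) (p : Nat), selPos M xs (p + M) = selPos M xs p := by
  intro xs
  induction xs with
  | nil => intro p; rfl
  | cons x t ih =>
    intro p
    simp only [selPos]
    rw [show p + M + 1 = p + 1 + M by omega, Nat.add_mod_right, ih]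

lemma selPos_append (M : Nat) : ∀ (xs ys : List Int) (p : Nat),
    selPos M (xs ++ ys) p = selPos M xs p + selPos M ys (p + xs.length) := by
  intro xs
  induction xs with
  | nil => intro ys p; simp [selPos]
  | cons x t ih =>
    intro ys p
    simp only [List.cons_append, selPos, ih, List.length_cons]
    rw [show p + (t.length + 1) = p + 1 + t.length by omega]
    ring

lemma selPos_replicate (M : Nat) (hM : 0 < M) (v : Int) : ∀ (c p : Nat),
    selPos M (List.replicate c v) p = v * (((p + c) / M : Nat) : Int) - v * ((p / M : Nat) : Int) := by
  intro c
  induction c with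
  | zero => intro p; simp [selPos]
  | succ c ih =>
    intro p
    rw [List.replicate_succ]
    simp only [selPos, ih (p + 1)]
    have hdvd : (p + 1) % M = 0 ↔ M ∣ (p + 1) := Nat.dvd_iff_mod_eq_zero.symm
    have hsucc : (p + 1) / M = p / M + if M ∣ (p + 1) then 1 else 0 := Nat.succ_div
    by_cases h : M ∣ (p + 1)
    · rw [if_pos (hdvd.mpr h)]
      rw [if_pos h] at hsucc
      rw [show p + 1 + c = p + (c+1) by omega, hsucc]
      push_cast
      ring
    · rw [if_neg (fun hc => h (hdvd.mp hc))]
      rw [if_neg h, Nat.add_zero] at hsucc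
      rw [show p + 1 + c = p + (c+1) by omega, hsucc]
      ring

lemma selPos_short (M : Nat) : ∀ (xs : List Int) (p : Nat), p + xs.length < M → selPos M xs p = 0 := by
  intro xs
  induction xs with
  | nil => intro p _; rfl
  | cons x t ih =>
    intro p hp
    simp only [List.length_cons] at hp
    simp only [selPos]
    rw [Nat.mod_eq_of_lt (by omega), if_neg (by omega), ih (p+1) (by omega)]
    ring

lemma selPos_full (M : Nat) (hM : 0 < M) : ∀ (xs : List Int) (p : Nat), p + xs.length = M → p < M →
    selPos M xs p = xs.getD (M - 1 - p) 0 := by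
  intro xs
  induction xs with
  | nil => intro p h1 h2; exfalso; simp at h1; omega
  | cons x t ih =>
    intro p h1 h2
    simp only [List.length_cons] at h1
    simp only [selPos]
    by_cases h : p + 1 = M
    · have ht : t.length = 0 := by omega
      rw [List.length_eq_zero_iff.mp ht]
      simp [selPos, show M - 1 - p = 0 by omega, Nat.mod_self, show p + 1 = M from h]
    · rw [Nat.mod_eq_of_lt (by omega), if_neg (by omega), ih (p+1) (by omega) (by omega)]
      have : M - 1 - p = (M - 1 - (p+1)) + 1 := by omega
      rw [this]
      simp

-- selPos of a whole list from position 0 = the sum over full M-chunks of each chunk's last element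
lemma selPos_chunks (M : Nat) (hM : 0 < M) : ∀ (q : Nat) (E : List Int), E.length / M = q →
    selPos M E 0 = ((List.range q).map (fun i => E.getD (i * M + M - 1) 0)).sum := by
  intro q
  induction q with
  | zero =>
    intro E hE
    have : E.length < M := by
      rcases Nat.lt_or_ge E.length M with h | h
      · exact h
      · exact absurd hE (by have := Nat.one_le_div_iff hM |>.mpr h; omega)
    simp [selPos_short M E 0 (by omega)]
  | succ q ih =>
    intro E hE
    have hlen : M ≤ E.length := by
      by_contra h
      rw [Nat.div_eq_of_lt (by omega)] at hE
      omega
    have hsplit : E = E.take M ++ E.drop M := (List.take_append_drop M E).symm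
    have htl : (E.take M).length = M := by simp [hlen]
    calc selPos M E 0
        = selPos M (E.take M) 0 + selPos M (E.drop M) (0 + (E.take M).length) := by
          conv_lhs => rw [hsplit]
          exact selPos_append M _ _ 0
      _ = E.getD (M - 1) 0 + selPos M (E.drop M) 0 := by
          rw [selPos_full M hM _ 0 (by simp [htl]) hM, htl, Nat.zero_add]
          congr 1
          · rw [Nat.sub_zero, List.getD_eq_getElem?_getD, List.getD_eq_getElem?_getD,
              List.getElem?_take_of_lt (by omega)]
          · simpa using selPos_shift M (E.drop M) 0
      _ = _ := by
          rw [ih (E.drop M) (by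
            rw [List.length_drop]
            rw [show E.length = (E.length - M) + M by omega, Nat.add_div_right _ hM] at hE
            omega)]
          rw [List.range_succ_eq_map]
          simp only [List.map_cons, List.sum_cons, List.map_map]
          congr 1
          · simp
          · congr 1
            apply List.map_congr_left
            intro i _
            simp only [Function.comp_apply]
            rw [List.getD_eq_getElem?_getD, List.getD_eq_getElem?_getD, List.getElem?_drop]
            congr 2
            rw [Nat.succ_mul]
            omega

-- B's per-group fold over descending distinct values, with counts cnt, equals selPos of the expansion
lemma fold_eq (M : Nat) (hM : 0 < M) (cnt : Int → Nat) :
    ∀ (ks : List Int) (t : Int) (p : Nat),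
    ks.foldl (fun (st : Int × Int) v =>
        (st.1 + v * (PySem.Int.floordiv (st.2 + (cnt v : Int)) (M : Int) - PySem.Int.floordiv st.2 (M : Int)) * (M : Int),
         st.2 + (cnt v : Int))) (t, (p : Int))
    = (t + selPos M (ks.flatMap (fun v => List.replicate (cnt v) v)) p * (M : Int),
       ((p + (ks.map cnt).sum : Nat) : Int)) := by
  intro ks
  induction ks with
  | nil => intro t p; simp [selPos]
  | cons v ks ih =>
    intro t p
    simp only [List.foldl_cons]
    have hcast : (p : Int) + (cnt v : Int) = ((p + cnt v : Nat) : Int) := by push_cast; ring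
    rw [hcast, ih]
    simp only [List.flatMap_cons, List.map_cons, List.sum_cons]
    rw [selPos_append, Prod.mk.injEq]
    refine ⟨?_, by push_cast; ring⟩
    rw [PySem.Int.floordiv_natCast, show ((p : Int)) = ((p : Nat) : Int) from rfl,
      PySem.Int.floordiv_natCast, selPos_replicate M hM v (cnt v) p, List.length_replicate]
    push_cast
    ring

-- pairwise and count facts about the expansion of a strictly-descending key list
lemma expand_pairwise (cnt : Int → Nat) : ∀ (ks : List Int), ks.Pairwise (fun a b => b < a) →
    (ks.flatMap (fun v => List.replicate (cnt v) v)).Pairwise (fun a b : Int => b ≤ a) := by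
  intro ks
  induction ks with
  | nil => intro _; simp
  | cons v ks ih =>
    intro hp
    rcases List.pairwise_cons.mp hp with ⟨hv, hp'⟩
    simp only [List.flatMap_cons]
    rw [List.pairwise_append]
    refine ⟨?_, ih hp', ?_⟩
    · exact List.pairwise_replicate.mpr (Or.inr le_rfl)
    · intro x hx y hy
      rcases List.mem_flatMap.mp hy with ⟨u, hu, hyr⟩
      rw [List.eq_of_mem_replicate hx, List.eq_of_mem_replicate hyr]
      exact le_of_lt (hv u hu)

lemma expand_count (cnt : Int → Nat) : ∀ (ks : List Int), ks.Nodup → ∀ (x : Int),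
    (ks.flatMap (fun v => List.replicate (cnt v) v)).count x = if x ∈ ks then cnt x else 0 := by
  intro ks
  induction ks with
  | nil => intro _ x; simp
  | cons v ks ih =>
    intro hnd x
    rcases List.nodup_cons.mp hnd with ⟨hv, hnd'⟩
    simp only [List.flatMap_cons, List.count_append, ih hnd' x, List.count_replicate]
    by_cases hxv : x = v
    · subst hxv
      simp [hv]
    · by_cases hxk : x ∈ ks <;> simp [hxk, Ne.symm hxv, hxv]

-- the expansion of the descending-sorted distinct values with multiplicities IS the descending sort
lemma expand_eq_sorted (score : List Int) :
    ((PySem.List.sorted (PySem.Set.ofList score) (fun x => x) true).flatMap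
        (fun v => List.replicate (score.count v) v))
    = PySem.List.sorted score (fun x => x) true := by
  set ks := PySem.List.sorted (PySem.Set.ofList score) (fun x => x) true with hks
  have hperm_ks : ks.Perm (PySem.Set.ofList score) := PySem.List.sorted_perm ..
  have hnd : ks.Nodup := hperm_ks.nodup_iff.mpr (PySem.Set.nodup_ofList score)
  have hpw_ge : ks.Pairwise (fun a b : Int => b ≤ a) := by
    simpa using PySem.List.sorted_pairwise_rev (PySem.Set.ofList score) (fun x => x)
  have hpw : ks.Pairwise (fun a b : Int => b < a) := by
    have : ks.Pairwise (fun a b : Int => b ≤ a ∧ a ≠ b) := hpw_ge.and (List.Pairwise.imp (by tauto) hnd)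
    exact this.imp (by rintro a b ⟨h1, h2⟩; omega)
  set E := ks.flatMap (fun v => List.replicate (score.count v) v) with hE
  have hpermE : E.Perm score := by
    rw [List.perm_iff_count]
    intro x
    rw [hE, expand_count _ ks hnd x]
    by_cases hx : x ∈ score
    · rw [if_pos (by rw [hks, PySem.List.mem_sorted]; exact (PySem.Set.mem_ofList ..).mpr hx)]
    · rw [if_neg (by rw [hks, PySem.List.mem_sorted, PySem.Set.mem_ofList]; exact hx),
        List.count_eq_zero_of_not_mem hx]
  have hpwE : E.Pairwise (fun a b : Int => b ≤ a) := expand_pairwise _ ks hpw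
  have hpwD : (PySem.List.sorted score (fun x => x) true).Pairwise (fun a b : Int => b ≤ a) := by
    simpa using PySem.List.sorted_pairwise_rev score (fun x => x)
  exact List.Perm.eq_of_pairwise (fun a b _ _ h1 h2 => by omega) hpwE hpwD
    (hpermE.trans ((PySem.List.sorted_perm score (fun x => x) true).symm))

-- (from the previous development) the running min over an antitone list is its last element
lemma foldl_min_anti : ∀ (l : List Int) (x : Int),
    (x :: l).Pairwise (fun a b => b ≤ a) → l.foldl min x = (x :: l).getD l.length 0 := by
  intro l
  induction l with
  | nil => intro x _; rfl
  | cons h t ih =>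
    intro x hp
    have hx : h ≤ x := (List.pairwise_cons.mp hp).1 h (by simp)
    have hp' : (h :: t).Pairwise (fun a b : Int => b ≤ a) := (List.pairwise_cons.mp hp).2
    simp only [List.foldl_cons, min_eq_right hx]
    simpa using ih h hp'

lemma min?_anti (l : List Int) (hne : l ≠ []) (hp : l.Pairwise (fun a b => b ≤ a)) :
    (PySem.List.min? l (fun x => x)).getD 0 = l.getD (l.length - 1) 0 := by
  cases l with
  | nil => simp at hne
  | cons x t =>
    rw [PySem.List.min?_id_cons, Option.getD_some, foldl_min_anti t x hp]
    simp

-- the min of the kk-th m-block of the descending sort is its last element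
lemma blockmin (score : List Int) (M : Nat) (hM : 0 < M) (kk : Nat) (hk : (kk + 1) * M ≤ score.length) :
    (PySem.List.min? (PySem.List.slice (PySem.List.sorted score (fun x => x) true)
        (some ((kk * M : Nat) : Int)) (some ((kk * M + M : Nat) : Int))) (fun x => x)).getD 0
    = (PySem.List.sorted score (fun x => x) true).getD (kk * M + M - 1) 0 := by
  have hsm : (kk + 1) * M = kk * M + M := Nat.succ_mul kk M
  rw [hsm] at hk
  set desc := PySem.List.sorted score (fun x => x) true with hdesc
  have hlenD : desc.length = score.length := PySem.List.length_sorted ..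
  rw [PySem.List.slice_natCast]
  have harith : kk * M + M - kk * M = M := by omega
  rw [harith]
  set block := (desc.drop (kk * M)).take M with hblock
  have hlenB : block.length = M := by
    simp [hblock, hlenD]; omega
  have hne : block ≠ [] := by
    intro h; rw [h] at hlenB; simp at hlenB; omega
  have hpb : block.Pairwise (fun a b : Int => b ≤ a) :=
    (PySem.List.sorted_pairwise_rev score (fun x => x)).sublist
      ((List.take_sublist _ _).trans (List.drop_sublist _ _))
  rw [min?_anti block hne hpb, hlenB]
  have h1 : M - 1 < block.length := by omega
  rw [List.getD_eq_getElem block 0 h1]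
  have h2 : block[M-1]'h1 = desc[kk * M + (M - 1)]'(by omega) := by
    show (List.take M (List.drop (kk * M) desc))[M-1]'(hblock ▸ h1) = _
    rw [List.getElem_take, List.getElem_drop]
  rw [h2, List.getD_eq_getElem desc 0 (by omega)]
  congr 1
  omega

theorem main_eq (k m : Int) (score : List Int) (hm0 : m ≠ 0) :
    solution k m score = solution_alt k m score := by
  by_cases hpos : 0 < m
  · obtain ⟨M, rfl⟩ : ∃ M : Nat, m = (M : Int) := ⟨m.toNat, (Int.toNat_of_nonneg (by omega)).symm⟩
    have hM : 0 < M := by exact_mod_cast hpos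
    set n := score.length with hn
    set Q := n / M with hQ
    set D := PySem.List.sorted score (fun x => x) true with hD
    have hlenD : D.length = n := PySem.List.length_sorted ..
    -- A's side: the fold is the sum of the box minima, each the last element of its block
    have hA : solution k (M : Int) score
        = ((List.range Q).map (fun i => D.getD (i * M + M - 1) 0 * (M : Int))).sum := by
      unfold solution
      dsimp only
      rw [← hn, PySem.Int.floordiv_natCast, ← hQ, PySem.List.pyRange_zero_nat Q,
        List.foldl_map, PySem.List.foldl_add, zero_add]
      congr 1
      apply List.map_congr_left
      intro i hi
      have hiQ : i < Q := List.mem_range.mp hi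
      have hk' : (i + 1) * M ≤ n := le_trans (Nat.mul_le_mul_right M hiQ) (Nat.div_mul_le_self n M)
      have e1 : (i : Int) * (M : Int) = ((i * M : Nat) : Int) := by push_cast; ring
      have e2 : ((i : Int) + 1) * (M : Int) = ((i * M + M : Nat) : Int) := by push_cast; ring
      rw [e1, e2, ← hD, blockmin score M hM i hk']
    by_cases hQ0 : Q = 0
    · -- no full box: both sides are 0
      rw [hA, hQ0]
      unfold solution_alt
      dsimp only
      rw [← hn, PySem.Int.floordiv_natCast, ← hQ, hQ0]
      simp
    · -- at least one box
      unfold solution_alt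
      dsimp only
      rw [← hn, PySem.Int.floordiv_natCast, ← hQ, if_neg (not_le.mpr (by exact_mod_cast Nat.pos_of_ne_zero hQ0))]
      rw [PySem.Dict.foldl_insert_getD_add_one_eq_counter]
      simp only [PySem.Dict.getD_counter, PySem.Dict.keys_counter]
      rw [show ((0 : Int), (0 : Int)) = ((0 : Int), ((0 : Nat) : Int)) by norm_num,
        fold_eq M hM (fun v => score.count v) _ 0 0]
      rw [expand_eq_sorted score, ← hD]
      rw [selPos_chunks M hM Q D (by rw [hlenD])]
      rw [hA, zero_add, ← List.sum_map_mul_right]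
  · -- m < 0 : no boxes, both sides are 0
    have hneg : m < 0 := by omega
    have hq : PySem.Int.floordiv (score.length : Int) m ≤ 0 := by
      have h1 := PySem.Int.floordiv_mul_add_mod (score.length : Int) m
      have h2 := PySem.Int.mod_neg_bounds (a := (score.length : Int)) hneg
      have h3 : (0 : Int) ≤ (score.length : Int) := Int.natCast_nonneg _
      nlinarith [h2.1, h2.2]
    have hq1 : PySem.Int.floordiv (score.length : Int) m + 1 ≤ 1 := by omega
    unfold solution solution_alt
    dsimp only
    rw [if_pos hq, PySem.List.pyRange_one_eq_nil hq, List.foldl_nil]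

-- ===== VERDICT (by name: the statement is the Claim_ definition above) =====
theorem solution_spec : Claim_equal_solution := by
  intro k m score _ hpre
  unfold Spec_solution
  exact main_eq k m score hpre
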